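-- pv_equiv track=rewrite | github.com/tcuongd/advent-of-code | 2022/day9.py | move_position_based
-- ===== SOURCE A (Python) =====
-- def is_adjacent(head: list[int], tail: list[int]) -> bool:
--     if abs(tail[1] - head[1]) >= 2:
--         return False
--     elif abs(tail[0] - head[0]) >= 2:
--         return False
--     return True
--
-- def move_position_based(head_coords: list[tuple[int, int]]) -> list[tuple[int, int]]:
--     tail_coords = []
--     tail = [0, 0]
--     for head in head_coords:
--         if not is_adjacent(head, tail):
--             if head[0] - tail[0] >= 2:
--                 for _ in range(head[0] - tail[0] - 1):
--                     tail[0] += 1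
--                     if head[1] > tail[1]:
--                         tail[1] += 1
--                     elif head[1] < tail[1]:
--                         tail[1] -= 1
--             elif tail[0] - head[0] >= 2:
--                 for _ in range(tail[0] - head[0] - 1):
--                     tail[0] -= 1
--                     if head[1] > tail[1]:
--                         tail[1] += 1
--                     elif head[1] < tail[1]:
--                         tail[1] -= 1
--             elif head[1] - tail[1] >= 2:
--                 for _ in range(head[1] - tail[1] - 1):
--                     tail[1] += 1
--                     if head[0] > tail[0]:
--                         tail[0] += 1
--                     elif head[0] < tail[0]:
--                         tail[0] -= 1
--             elif tail[1] - head[1] >= 2: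
--                 for _ in range(tail[1] - head[1] - 1):
--                     tail[1] -= 1
--                     if head[0] > tail[0]:
--                         tail[0] += 1
--                     elif head[0] < tail[0]:
--                         tail[0] -= 1
--             tail_coords.append(tuple(tail))
--     return tail_coords
-- ===== SOURCE B (Python) =====
-- def move_position_based(head_coords):
--     out = []
--     tx, ty = 0, 0
--     for hx, hy in head_coords:
--         dx, dy = hx - tx, hy - ty
--         if abs(dx) < 2 and abs(dy) < 2:
--             continue
--         if abs(dx) >= 2:
--             sx = 1 if dx > 0 else -1
--             sy = 1 if dy > 0 else (-1 if dy < 0 else 0)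
--             tx = hx - sx
--             ty = ty + sy * min(abs(dx) - 1, abs(dy))
--         else:
--             sy = 1 if dy > 0 else -1
--             sx = 1 if dx > 0 else (-1 if dx < 0 else 0)
--             ty = hy - sy
--             tx = tx + sx * min(abs(dy) - 1, abs(dx))
--         out.append((tx, ty))
--     return out
-- ===== Notes on version B (the rewrite author's own statement) =====
-- stated objective: faster
-- what changed: Replaces A's per-unit-step inner loops (one increment per cell the tail crosses) by a closed-form jump: tail lands one short of the head on the dominant axis and the secondary coordinate moves toward the head by min(steps, |gap|), computed arithmetically.
import Mathlib
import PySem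

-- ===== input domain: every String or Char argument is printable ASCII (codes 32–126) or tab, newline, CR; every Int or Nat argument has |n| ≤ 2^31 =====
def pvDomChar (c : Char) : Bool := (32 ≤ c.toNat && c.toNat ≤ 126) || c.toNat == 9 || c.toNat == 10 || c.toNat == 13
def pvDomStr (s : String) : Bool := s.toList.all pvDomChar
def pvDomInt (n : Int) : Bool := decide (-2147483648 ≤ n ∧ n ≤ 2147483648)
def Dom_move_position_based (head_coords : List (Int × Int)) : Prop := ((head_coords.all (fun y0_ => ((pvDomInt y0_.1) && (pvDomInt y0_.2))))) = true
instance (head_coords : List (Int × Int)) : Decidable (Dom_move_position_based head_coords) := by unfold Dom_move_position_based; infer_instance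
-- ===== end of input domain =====

-- B replaces A's per-unit-step inner loops by a closed-form arithmetic jump per head position.

-- ===== PORT A =====
def is_adjacent (head tail : Int × Int) : Bool :=
  if 2 ≤ (tail.2 - head.2).natAbs then false
  else if 2 ≤ (tail.1 - head.1).natAbs then false
  else true

-- the four per-unit-step inner loops of A, as folds over range(k)
def aNewTail (head tail : Int × Int) : Int × Int :=
  if head.1 - tail.1 ≥ 2 then
    (PySem.List.pyRange 0 (head.1 - tail.1 - 1) 1).foldl
      (fun t _ =>
        (t.1 + 1, if head.2 > t.2 then t.2 + 1 else if head.2 < t.2 then t.2 - 1 else t.2)) tail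
  else if tail.1 - head.1 ≥ 2 then
    (PySem.List.pyRange 0 (tail.1 - head.1 - 1) 1).foldl
      (fun t _ =>
        (t.1 - 1, if head.2 > t.2 then t.2 + 1 else if head.2 < t.2 then t.2 - 1 else t.2)) tail
  else if head.2 - tail.2 ≥ 2 then
    (PySem.List.pyRange 0 (head.2 - tail.2 - 1) 1).foldl
      (fun t _ =>
        (if head.1 > t.1 then t.1 + 1 else if head.1 < t.1 then t.1 - 1 else t.1, t.2 + 1)) tail
  else if tail.2 - head.2 ≥ 2 then
    (PySem.List.pyRange 0 (tail.2 - head.2 - 1) 1).foldl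
      (fun t _ =>
        (if head.1 > t.1 then t.1 + 1 else if head.1 < t.1 then t.1 - 1 else t.1, t.2 - 1)) tail
  else tail

def moveAStep (st : List (Int × Int) × (Int × Int)) (head : Int × Int) : List (Int × Int) × (Int × Int) :=
  if ¬ is_adjacent head st.2 then
    let tail := aNewTail head st.2
    (st.1 ++ [tail], tail)
  else st

def move_position_based (head_coords : List (Int × Int)) : List (Int × Int) :=
  (head_coords.foldl moveAStep ([], (0, 0))).1

-- ===== PORT B =====
-- closed-form jump: land one short of the head on the dominant axis,
-- move the secondary coordinate toward the head by min(steps, |gap|)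
def bNewTail (head tail : Int × Int) : Int × Int :=
  let dx := head.1 - tail.1
  let dy := head.2 - tail.2
  if (dx.natAbs : Int) ≥ 2 then
    let sx : Int := if dx > 0 then 1 else -1
    let sy : Int := if dy > 0 then 1 else if dy < 0 then -1 else 0
    (head.1 - sx, tail.2 + sy * min ((dx.natAbs : Int) - 1) (dy.natAbs : Int))
  else
    let sy : Int := if dy > 0 then 1 else -1
    let sx : Int := if dx > 0 then 1 else if dx < 0 then -1 else 0
    (tail.1 + sx * min ((dy.natAbs : Int) - 1) (dx.natAbs : Int), head.2 - sy)

def moveBStep (st : List (Int × Int) × (Int × Int)) (head : Int × Int) : List (Int × Int) × (Int × Int) :=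
  if ((head.1 - st.2.1).natAbs : Int) < 2 ∧ ((head.2 - st.2.2).natAbs : Int) < 2 then st
  else
    let tail := bNewTail head st.2
    (st.1 ++ [tail], tail)

def move_position_based_alt (head_coords : List (Int × Int)) : List (Int × Int) :=
  (head_coords.foldl moveBStep ([], (0, 0))).1

-- ===== PRECONDITION & SPEC =====
def Spec_move_position_based (head_coords : List (Int × Int)) (out : List (Int × Int)) : Prop := out = move_position_based_alt head_coords
instance (head_coords : List (Int × Int)) (out : List (Int × Int)) : Decidable (Spec_move_position_based head_coords out) := by unfold Spec_move_position_based; infer_instance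

-- ===== CLAIM (what is proved, stated in full; the proofs are below) =====
def Claim_equal_move_position_based : Prop := ∀ (head_coords : List (Int × Int)), Dom_move_position_based head_coords → Spec_move_position_based head_coords (move_position_based head_coords)

-- ===== LEMMAS AND PROOFS =====

-- closed forms of A's four inner loops (only the list's length matters)
theorem loop_px (h2 : Int) (l : List Int) : ∀ (t : Int × Int),
    l.foldl (fun t _ =>
      ((t.1 + 1 : Int), if h2 > t.2 then t.2 + 1 else if h2 < t.2 then t.2 - 1 else t.2)) t
    = (t.1 + l.length, if h2 ≥ t.2 then min h2 (t.2 + l.length) else max h2 (t.2 - l.length)) := by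
  induction l with
  | nil =>
      intro t
      refine Prod.ext_iff.mpr ⟨by simp, ?_⟩
      simp only [List.foldl_nil, List.length_nil, Nat.cast_zero, add_zero, sub_zero]
      split_ifs <;> omega
  | cons a l ih =>
      intro t
      rw [List.foldl_cons, ih]
      refine Prod.ext_iff.mpr ⟨?_, ?_⟩ <;>
        simp only [List.length_cons, Nat.cast_add, Nat.cast_one] <;>
        (first | (split_ifs <;> omega) | omega)

theorem loop_nx (h2 : Int) (l : List Int) : ∀ (t : Int × Int),
    l.foldl (fun t _ =>
      ((t.1 - 1 : Int), if h2 > t.2 then t.2 + 1 else if h2 < t.2 then t.2 - 1 else t.2)) t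
    = (t.1 - l.length, if h2 ≥ t.2 then min h2 (t.2 + l.length) else max h2 (t.2 - l.length)) := by
  induction l with
  | nil =>
      intro t
      refine Prod.ext_iff.mpr ⟨by simp, ?_⟩
      simp only [List.foldl_nil, List.length_nil, Nat.cast_zero, add_zero, sub_zero]
      split_ifs <;> omega
  | cons a l ih =>
      intro t
      rw [List.foldl_cons, ih]
      refine Prod.ext_iff.mpr ⟨?_, ?_⟩ <;>
        simp only [List.length_cons, Nat.cast_add, Nat.cast_one] <;>
        (first | (split_ifs <;> omega) | omega)

theorem loop_py (h1 : Int) (l : List Int) : ∀ (t : Int × Int),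
    l.foldl (fun t _ =>
      ((if h1 > t.1 then t.1 + 1 else if h1 < t.1 then t.1 - 1 else t.1), (t.2 + 1 : Int))) t
    = ((if h1 ≥ t.1 then min h1 (t.1 + l.length) else max h1 (t.1 - l.length)), t.2 + l.length) := by
  induction l with
  | nil =>
      intro t
      refine Prod.ext_iff.mpr ⟨?_, by simp⟩
      simp only [List.foldl_nil, List.length_nil, Nat.cast_zero, add_zero, sub_zero]
      split_ifs <;> omega
  | cons a l ih =>
      intro t
      rw [List.foldl_cons, ih]
      refine Prod.ext_iff.mpr ⟨?_, ?_⟩ <;>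
        simp only [List.length_cons, Nat.cast_add, Nat.cast_one] <;>
        (first | (split_ifs <;> omega) | omega)

theorem loop_ny (h1 : Int) (l : List Int) : ∀ (t : Int × Int),
    l.foldl (fun t _ =>
      ((if h1 > t.1 then t.1 + 1 else if h1 < t.1 then t.1 - 1 else t.1), (t.2 - 1 : Int))) t
    = ((if h1 ≥ t.1 then min h1 (t.1 + l.length) else max h1 (t.1 - l.length)), t.2 - l.length) := by
  induction l with
  | nil =>
      intro t
      refine Prod.ext_iff.mpr ⟨?_, by simp⟩
      simp only [List.foldl_nil, List.length_nil, Nat.cast_zero, add_zero, sub_zero]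
      split_ifs <;> omega
  | cons a l ih =>
      intro t
      rw [List.foldl_cons, ih]
      refine Prod.ext_iff.mpr ⟨?_, ?_⟩ <;>
        simp only [List.length_cons, Nat.cast_add, Nat.cast_one] <;>
        (first | (split_ifs <;> omega) | omega)

theorem newtail_eq (hx hy tx ty : Int)
    (h : ¬(((hx - tx).natAbs : Int) < 2 ∧ ((hy - ty).natAbs : Int) < 2)) :
    aNewTail (hx, hy) (tx, ty) = bNewTail (hx, hy) (tx, ty) := by
  simp only [aNewTail, bNewTail]
  by_cases h1 : hx - tx ≥ 2
  · rw [if_pos h1, if_pos (show ((hx - tx).natAbs : Int) ≥ 2 by omega), loop_px,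
      PySem.List.length_pyRange_one]
    refine Prod.ext_iff.mpr ⟨?_, ?_⟩ <;> simp only [] <;> split_ifs <;> omega
  · by_cases h2 : tx - hx ≥ 2
    · rw [if_neg h1, if_pos h2, if_pos (show ((hx - tx).natAbs : Int) ≥ 2 by omega), loop_nx,
        PySem.List.length_pyRange_one]
      refine Prod.ext_iff.mpr ⟨?_, ?_⟩ <;> simp only [] <;> split_ifs <;> omega
    · have hxs : ¬ ((hx - tx).natAbs : Int) ≥ 2 := by omega
      by_cases h3 : hy - ty ≥ 2
      · rw [if_neg h1, if_neg h2, if_pos h3, if_neg hxs, loop_py,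
          PySem.List.length_pyRange_one]
        refine Prod.ext_iff.mpr ⟨?_, ?_⟩ <;> simp only [] <;> split_ifs <;> omega
      · have h4 : ty - hy ≥ 2 := by omega
        rw [if_neg h1, if_neg h2, if_neg h3, if_pos h4, if_neg hxs, loop_ny,
          PySem.List.length_pyRange_one]
        refine Prod.ext_iff.mpr ⟨?_, ?_⟩ <;> simp only [] <;> split_ifs <;> omega

theorem step_eq : moveAStep = moveBStep := by
  funext st head
  obtain ⟨acc, tx, ty⟩ := st
  obtain ⟨hx, hy⟩ := head
  by_cases hadj : ((hx - tx).natAbs : Int) < 2 ∧ ((hy - ty).natAbs : Int) < 2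
  · have ha : is_adjacent (hx, hy) (tx, ty) = true := by
      simp only [is_adjacent]; split_ifs <;> first | rfl | omega
    simp only [moveAStep, moveBStep, ha]
    rw [if_neg (by simp), if_pos hadj]
  · have ha : is_adjacent (hx, hy) (tx, ty) = false := by
      simp only [is_adjacent]; split_ifs <;> first | rfl | omega
    simp only [moveAStep, moveBStep, ha]
    rw [if_pos (by simp), if_neg hadj, newtail_eq hx hy tx ty hadj]

-- ===== VERDICT (by name: the statement is the Claim_ definition above) =====
theorem move_position_based_spec : Claim_equal_move_position_based := by
  intro l _
  unfold Spec_move_position_based move_position_based move_position_based_alt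
  rw [step_eq]
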